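-- pv_equiv track=rewrite | github.com/pypi-data/pypi-mirror-390 | packages/ide4ai/ide4ai-0.1.0b0.tar.gz/ide4ai-0.1.0b0/ide4ai/environment/workspace/utils.py | count_eol
-- ===== SOURCE A (Python) =====
-- def count_eol(text: str) -> tuple[int, int, int, int]:
--     """
--     Counts the number of end-of-line characters and types in the text, and returns the length of the first line and the
--     start of the last line.
--
--     统计文本中的行结束符数量和类型，并返回首行长度及最后一行的起始索引。
--
--     Args:
--         text: A string representing the input text. | 输入文本的字符串。
--
--     Returns:
--         A tuple containing four integers:
--         返回一个包含四个整数的元组：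
--
--         1. eol_count: The number of end-of-line characters or sequences in the text. | 文本中行结束符的数量。
--         2. first_line_length: The length of the first line up to but not including the first end-of-line character. |
--             首行的长度，不包括第一个行结束符。
--         3. last_line_start_to_end_length: The length of the text from the start of the last line to the end of the text.
--             | 从最后一行开始到文本结束的长度。
--         4. eol: An integer representing the type of end-of-line character(s) found in the text. Possible values are:
--             | 表示在文本中找到的行结束符类型的整数。可能的值包括：
--             - 0: No end-of-line character found. | 没有找到行结束符。
--             - 1: Only the line feed character ('\n') found. | 仅找到换行符（'\n'）。
--             - 2: Only the carriage return and line feed sequence ('\r\n') found. | 仅找到回车和换行符序列（'\r\n'）。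
--             - 3: Other combinations or invalid end-of-line character(s) found. | 找到其他组合或无效的行结束符。
--     """
--     eol_count = 0
--     first_line_length = 0
--     last_line_start = 0
--     eol = 0  # StringEOL.Unknown
--
--     i = 0
--     length = len(text)
--     while i < length:
--         i_chr = ord(text[i])
--         if i_chr == 13:  # CharCode.CarriageReturn
--             if eol_count == 0:
--                 first_line_length = i
--             eol_count += 1
--             if i + 1 < length and ord(text[i + 1]) == 10:  # CharCode.LineFeed
--                 eol |= 2  # StringEOL.CRLF
--                 i += 1  # skip \n
--             else:
--                 eol |= 3  # StringEOL.Invalid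
--             last_line_start = i + 1
--         elif i_chr == 10:  # CharCode.LineFeed
--             eol |= 1  # StringEOL.LF
--             if eol_count == 0:
--                 first_line_length = i
--             eol_count += 1
--             last_line_start = i + 1
--         i += 1
--
--     if eol_count == 0:
--         first_line_length = length
--
--     return eol_count, first_line_length, length - last_line_start, eol
-- ===== SOURCE B (Python) =====
-- def _eol_tokens(text):
--     """Yield (start, end, kind) for every EOL token, kind: 1=LF, 2=CRLF, 3=lone CR."""
--     i, length = 0, len(text)
--     while i < length:
--         c = text[i]
--         if c == '\n':
--             yield (i, i + 1, 1)
--             i += 1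
--         elif c == '\r':
--             if text[i:i + 2] == '\r\n':
--                 yield (i, i + 2, 2)
--                 i += 2
--             else:
--                 yield (i, i + 1, 3)
--                 i += 1
--         else:
--             i += 1
--
--
-- def count_eol(text: str) -> tuple[int, int, int, int]:
--     # Tokenize all end-of-line markers first, then reduce over the token list.
--     toks = list(_eol_tokens(text))
--     length = len(text)
--     if not toks:
--         return (0, length, length, 0)
--     eol = 0
--     for _, _, kind in toks:
--         eol |= kind
--     return (len(toks), toks[0][0], length - toks[-1][1], eol)
-- ===== Notes on version B (the rewrite author's own statement) =====
-- stated objective: alternative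
-- what changed: A fuses everything into one stateful while-loop carrying five accumulators; B first tokenizes the text into an explicit list of (start, end, kind) EOL tokens and then derives all four results by reducing over that list (length, head, last, OR-fold).
import Mathlib
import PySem

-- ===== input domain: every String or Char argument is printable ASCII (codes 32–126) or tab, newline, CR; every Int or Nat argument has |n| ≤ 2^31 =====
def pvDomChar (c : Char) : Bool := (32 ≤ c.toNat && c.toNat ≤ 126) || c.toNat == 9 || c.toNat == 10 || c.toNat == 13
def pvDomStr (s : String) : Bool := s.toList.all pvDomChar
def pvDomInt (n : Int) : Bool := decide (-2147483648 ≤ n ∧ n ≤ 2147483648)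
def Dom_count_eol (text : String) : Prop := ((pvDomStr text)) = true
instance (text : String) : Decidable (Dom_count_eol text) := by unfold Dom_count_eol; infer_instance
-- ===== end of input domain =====

-- B replaces A's fused five-accumulator scan by tokenize-then-reduce (alternative decomposition, same cost).


-- ===== PORT A =====
-- A's while-loop: state (i, eol_count, first_line_length, last_line_start, eol); the
-- '\r' branch's lookahead 'i + 1 < length and text[i+1] == 10' is the nested pattern.
def countEolLoop : List Char → Int → Int → Int → Int → Int → Int → Int × Int × Int × Int
  | [], _, length, eolCount, firstLineLength, lastLineStart, eol =>
      (eolCount, if eolCount = 0 then length else firstLineLength, length - lastLineStart, eol)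
  | '\r' :: '\n' :: rest, i, length, eolCount, firstLineLength, lastLineStart, eol =>
      countEolLoop rest (i + 2) length (eolCount + 1)
        (if eolCount = 0 then i else firstLineLength) (i + 2) (PySem.Int.bor eol 2)
  | '\r' :: rest, i, length, eolCount, firstLineLength, lastLineStart, eol =>
      countEolLoop rest (i + 1) length (eolCount + 1)
        (if eolCount = 0 then i else firstLineLength) (i + 1) (PySem.Int.bor eol 3)
  | '\n' :: rest, i, length, eolCount, firstLineLength, lastLineStart, eol =>
      countEolLoop rest (i + 1) length (eolCount + 1)
        (if eolCount = 0 then i else firstLineLength) (i + 1) (PySem.Int.bor eol 1)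
  | _ :: rest, i, length, eolCount, firstLineLength, lastLineStart, eol =>
      countEolLoop rest (i + 1) length eolCount firstLineLength lastLineStart eol

def count_eol (text : String) : Int × Int × Int × Int :=
  countEolLoop text.toList 0 (text.toList.length : Int) 0 0 0 0

-- ===== PORT B =====
-- B's _eol_tokens generator: the list of (start, end, kind) of every EOL token.
def eolTokens : List Char → Int → List (Int × Int × Int)
  | [], _ => []
  | '\n' :: rest, i => (i, i + 1, 1) :: eolTokens rest (i + 1)
  | '\r' :: '\n' :: rest, i => (i, i + 2, 2) :: eolTokens rest (i + 2)
  | '\r' :: rest, i => (i, i + 1, 3) :: eolTokens rest (i + 1)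
  | _ :: rest, i => eolTokens rest (i + 1)

def count_eol_alt (text : String) : Int × Int × Int × Int :=
  let length : Int := text.toList.length
  match eolTokens text.toList 0 with
  | [] => (0, length, length, 0)
  | t0 :: ts =>
      (((t0 :: ts).length : Int), t0.1,
       length - ((t0 :: ts).getLast (List.cons_ne_nil t0 ts)).2.1,
       (t0 :: ts).foldl (fun a t => PySem.Int.bor a t.2.2) 0)

-- ===== PRECONDITION & SPEC =====
def Spec_count_eol (text : String) (out : Int × Int × Int × Int) : Prop := out = count_eol_alt text
instance (text : String) (out : Int × Int × Int × Int) : Decidable (Spec_count_eol text out) := by unfold Spec_count_eol; infer_instance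

-- ===== CLAIM (what is proved, stated in full; the proofs are below) =====
def Claim_equal_count_eol : Prop := ∀ (text : String), Dom_count_eol text → Spec_count_eol text (count_eol text)

-- ===== LEMMAS AND PROOFS =====

-- end index of the last token, or d when there is none
def lastEnd (l : List (Int × Int × Int)) (d : Int) : Int :=
  match l.getLast? with
  | none => d
  | some t => t.2.1

theorem lastEnd_cons (t : Int × Int × Int) (l : List (Int × Int × Int)) (d : Int) :
    lastEnd (t :: l) d = lastEnd l t.2.1 := by
  cases l with
  | nil => simp [lastEnd]
  | cons a as =>
      rcases h : (a :: as).getLast? with _ | x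
      · simp at h
      · simp [lastEnd, List.getLast?_cons_cons, h]

-- A's loop, expressed as a reduction over the token list of the remaining text.
theorem loop_eq_tokens : ∀ (cs : List Char) (i length cnt fll lls eol : Int), 0 ≤ cnt →
    countEolLoop cs i length cnt fll lls eol =
      (cnt + ((eolTokens cs i).length : Int),
       (if cnt + ((eolTokens cs i).length : Int) = 0 then length
        else if cnt = 0 then ((eolTokens cs i).headD (0, 0, 0)).1 else fll),
       length - lastEnd (eolTokens cs i) lls,
       (eolTokens cs i).foldl (fun a t => PySem.Int.bor a t.2.2) eol) := by
  intro cs i length cnt fll lls eol hcnt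
  fun_induction eolTokens cs i generalizing cnt fll lls eol with
  | case1 x =>
      simp [countEolLoop, lastEnd]
      try split_ifs <;> rfl
  | case2 rest i ih =>
      have e2 : countEolLoop ('\n' :: rest) i length cnt fll lls eol =
          countEolLoop rest (i + 1) length (cnt + 1) (if cnt = 0 then i else fll) (i + 1)
            (PySem.Int.bor eol 1) := by
        simp [countEolLoop]
      rw [e2, ih (cnt + 1) (if cnt = 0 then i else fll) (i + 1) (PySem.Int.bor eol 1) (by omega)]
      have hn : (0 : Int) ≤ ((eolTokens rest (i + 1)).length : Int) := Int.natCast_nonneg _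
      have h1 : ¬(cnt + 1 = 0) := by omega
      have h2 : ¬(cnt + 1 + ((eolTokens rest (i + 1)).length : Int) = 0) := by omega
      have h3 : ¬(cnt + (((eolTokens rest (i + 1)).length : Int) + 1) = 0) := by omega
      simp [h1, h2, h3, lastEnd_cons] <;> omega
  | case3 rest i ih =>
      have e2 : countEolLoop ('\r' :: '\n' :: rest) i length cnt fll lls eol =
          countEolLoop rest (i + 2) length (cnt + 1) (if cnt = 0 then i else fll) (i + 2)
            (PySem.Int.bor eol 2) := by
        simp [countEolLoop]
      rw [e2, ih (cnt + 1) (if cnt = 0 then i else fll) (i + 2) (PySem.Int.bor eol 2) (by omega)]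
      have hn : (0 : Int) ≤ ((eolTokens rest (i + 2)).length : Int) := Int.natCast_nonneg _
      have h1 : ¬(cnt + 1 = 0) := by omega
      have h2 : ¬(cnt + 1 + ((eolTokens rest (i + 2)).length : Int) = 0) := by omega
      have h3 : ¬(cnt + (((eolTokens rest (i + 2)).length : Int) + 1) = 0) := by omega
      simp [h1, h2, h3, lastEnd_cons] <;> omega
  | case4 rest i hnot ih =>
      have e2 : countEolLoop ('\r' :: rest) i length cnt fll lls eol =
          countEolLoop rest (i + 1) length (cnt + 1) (if cnt = 0 then i else fll) (i + 1)
            (PySem.Int.bor eol 3) := by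
        cases rest with
        | nil => simp [countEolLoop]
        | cons a as =>
            have ha : ¬(a = '\n') := fun h => hnot as (by rw [h])
            simp [countEolLoop]
      rw [e2, ih (cnt + 1) (if cnt = 0 then i else fll) (i + 1) (PySem.Int.bor eol 3) (by omega)]
      have hn : (0 : Int) ≤ ((eolTokens rest (i + 1)).length : Int) := Int.natCast_nonneg _
      have h1 : ¬(cnt + 1 = 0) := by omega
      have h2 : ¬(cnt + 1 + ((eolTokens rest (i + 1)).length : Int) = 0) := by omega
      have h3 : ¬(cnt + (((eolTokens rest (i + 1)).length : Int) + 1) = 0) := by omega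
      simp [h1, h2, h3, lastEnd_cons] <;> omega
  | case5 c rest i hlf hcrlf hcr ih =>
      have hc1 : ¬(c = '\n') := fun h => hlf h
      have hc2 : ¬(c = '\r') := fun h => hcr h
      have e2 : countEolLoop (c :: rest) i length cnt fll lls eol =
          countEolLoop rest (i + 1) length cnt fll lls eol := by
        simp [countEolLoop]
      rw [e2, ih cnt fll lls eol hcnt]

-- ===== VERDICT (by name: the statement is the Claim_ definition above) =====
theorem count_eol_spec : Claim_equal_count_eol := by
  intro text _
  unfold Spec_count_eol count_eol count_eol_alt
  rw [loop_eq_tokens text.toList 0 (text.toList.length : Int) 0 0 0 0 le_rfl]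
  cases h : eolTokens text.toList 0 with
  | nil => simp [lastEnd]
  | cons t0 ts =>
      have hlast : lastEnd (t0 :: ts) 0 = ((t0 :: ts).getLast (List.cons_ne_nil t0 ts)).2.1 := by
        simp [lastEnd, List.getLast?_eq_some_getLast]
      simp [hlast]
      omega
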